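-- pv_equiv track=rewrite | github.com/Stagnant09/DiscordBots | botword.py | string_to_int_convert
-- ===== SOURCE A (Python) =====
-- def string_to_int_convert(text):
--     # Converts each text to a series of digits based on the characters of the input
--     # Essientially a name to id conversion
--     n = 0
--     i = 1
--     j = 0
--     char_ = [ord(text[0])]
--     start_ = 0
--     end_ = 0
--     for char in text:
--         j += 1
--         if ord(char) > char_[-1]:
--             char_.append(ord(char))
--             end_ = j
--         else:
--             char_ = [ord(char)]
--             start_ = j
--         n = n + (ord(char) - 96) * i
--         i *= 6
--         if char == 'a' or char == 'A' or char == '0' and i == 6**2: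
--             n = n + 1
--         if char == 'b' or char == 'B' or char == 'd' or char == 'D' and i == 6**3:
--             n = n + 2
--     n += (sum(char_) + start_ + end_ % 60)
--     #Limit n to its last 5 digits
--     n = n % 10**5
--     return n
-- ===== SOURCE B (Python) =====
-- def string_to_int_convert(text):
--     L = [ord(c) for c in text]
--     # base-6 positional value of the letters (Horner, least-significant position first)
--     n = 0
--     for v in reversed(L):
--         n = 6 * n + (v - 96)
--     # per-character bonuses: +1 for a/A, +2 for b/B/d, plus two position-specific bonuses
--     n += sum(c in 'aA' for c in text) + 2 * sum(c in 'bBd' for c in text)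
--     if len(text) > 1 and text[1] == '0':
--         n += 1
--     if len(text) > 2 and text[2] == 'D':
--         n += 2
--     # last position (1-based) where the code rises, and start of the final increasing run
--     end_ = max((j for j in range(2, len(L) + 1) if L[j - 1] > L[j - 2]), default=0)
--     start_ = max(j for j in range(1, len(L) + 1) if j == 1 or L[j - 1] <= L[j - 2])
--     return (n + sum(L[start_ - 1:]) + start_ + end_ % 60) % 10 ** 5
-- ===== Notes on version B (the rewrite author's own statement) =====
-- stated objective: alternative
-- what changed: A's single stateful scan carrying (n, i, j, char_, start_, end_) and materialising the current increasing run as a list is replaced by independent passes: a backward Horner evaluation of the base-6 weighted sum, character counts plus two fixed-position checks for the bonuses, and max-over-comprehension queries locating the last rise and the start of the final increasing run; Pre_ excludes only the empty string, on which A raises IndexError (B's max raises ValueError there too).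
import Mathlib
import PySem

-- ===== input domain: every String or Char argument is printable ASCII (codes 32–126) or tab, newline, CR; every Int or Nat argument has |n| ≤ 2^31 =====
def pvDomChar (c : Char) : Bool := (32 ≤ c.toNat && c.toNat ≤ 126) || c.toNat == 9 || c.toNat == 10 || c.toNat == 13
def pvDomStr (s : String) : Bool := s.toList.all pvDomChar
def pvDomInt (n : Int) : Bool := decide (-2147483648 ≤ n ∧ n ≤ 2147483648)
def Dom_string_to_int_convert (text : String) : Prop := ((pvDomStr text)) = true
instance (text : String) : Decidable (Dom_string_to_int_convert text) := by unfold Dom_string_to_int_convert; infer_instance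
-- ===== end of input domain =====

-- B replaces A's single stateful scan (which carries n, i, j, the current increasing run,
-- start_ and end_ together) by independent closed-form passes: a positional weighted sum,
-- counts plus two fixed-position checks for the bonuses, and max-over-filtered-range queries
-- for the run boundaries (objective: alternative decomposition, same cost).

-- ===== PORT A =====
-- state: (n, i, j, char_, start_, end_); j/start_/end_ are the nonnegative Python counters
def pvStepA (st : Int × Int × Nat × List Int × Nat × Nat) (c : Char) :
    Int × Int × Nat × List Int × Nat × Nat :=
  let n := st.1
  let i := st.2.1
  let j := st.2.2.1 + 1
  let char_ := st.2.2.2.1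
  let start_ := st.2.2.2.2.1
  let end_ := st.2.2.2.2.2
  let o : Int := (c.toNat : Int)
  let res : List Int × Nat × Nat :=
    if o > char_.getLastD 0 then (char_ ++ [o], start_, j) else ([o], j, end_)
  let n := n + (o - 96) * i
  let i := i * 6
  let n := if c = 'a' ∨ c = 'A' ∨ (c = '0' ∧ i = 36) then n + 1 else n
  let n := if c = 'b' ∨ c = 'B' ∨ c = 'd' ∨ (c = 'D' ∧ i = 216) then n + 2 else n
  (n, i, j, res)

def string_to_int_convert (text : String) : Int :=
  match text.toList with
  | [] => 0  -- Python A raises IndexError on text[0] here; excluded by Pre_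
  | c0 :: _ =>
    let st := text.toList.foldl pvStepA (0, 1, 0, [((c0.toNat : Nat) : Int)], 0, 0)
    PySem.Int.mod (st.1 + st.2.2.2.1.sum + (st.2.2.2.2.1 : Int) + ((st.2.2.2.2.2 % 60 : Nat) : Int)) (10 ^ 5)

-- ===== PORT B =====
-- All list indices below (j-1, j-2 for j drawn from the ranges, and the guarded text[1]/text[2])
-- are in range in the Python, so pyGetD/pyGet? are exact there.
def string_to_int_convert_alt (text : String) : Int :=
  let l := text.toList
  let L : List Int := l.map (fun c => (c.toNat : Int))
  let n : Int := L.reverse.foldl (fun n v => 6 * n + (v - 96)) 0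
  let n : Int := n + (l.countP (fun c => c == 'a' || c == 'A') : Int)
                   + 2 * (l.countP (fun c => c == 'b' || c == 'B' || c == 'd') : Int)
  let n : Int := if 1 < l.length ∧ PySem.List.pyGet? l 1 = some '0' then n + 1 else n
  let n : Int := if 2 < l.length ∧ PySem.List.pyGet? l 2 = some 'D' then n + 2 else n
  let rises := (PySem.List.pyRange 2 ((L.length : Int) + 1) 1).filter
    (fun j => decide (PySem.List.pyGetD L (j - 1) 0 > PySem.List.pyGetD L (j - 2) 0))
  let endv : Int := (PySem.List.max? rises (fun x => x)).getD 0
  let starts := (PySem.List.pyRange 1 ((L.length : Int) + 1) 1).filter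
    (fun j => j == 1 || decide (PySem.List.pyGetD L (j - 1) 0 ≤ PySem.List.pyGetD L (j - 2) 0))
  -- Python's max(...) raises ValueError when text is empty; excluded by Pre_
  let startv : Int := (PySem.List.max? starts (fun x => x)).getD 0
  PySem.Int.mod (n + (PySem.List.slice L (some (startv - 1)) none).sum + startv + PySem.Int.mod endv 60) (10 ^ 5)

-- ===== PRECONDITION & SPEC =====
-- Pre_ excludes only the empty string: Python A raises IndexError on text[0] there (and B's max raises ValueError).
def Pre_string_to_int_convert (text : String) : Prop := text.toList ≠ []
instance (text : String) : Decidable (Pre_string_to_int_convert text) := by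
  unfold Pre_string_to_int_convert; infer_instance

def pvWitness_string_to_int_convert : String := "abc"

def Spec_string_to_int_convert (text : String) (out : Int) : Prop := out = string_to_int_convert_alt text
instance (text : String) (out : Int) : Decidable (Spec_string_to_int_convert text out) := by unfold Spec_string_to_int_convert; infer_instance

-- ===== CLAIM (what is proved, stated in full; the proofs are below) =====
def Claim_equal_string_to_int_convert : Prop := ∀ (text : String), Dom_string_to_int_convert text → Pre_string_to_int_convert text → Spec_string_to_int_convert text (string_to_int_convert text)

-- ===== LEMMAS AND PROOFS =====

-- ords of a char list (proof-side abbreviation for B's mapped list)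
def pvLof (l : List Char) : List Int := l.map (fun c => ((c.toNat : Nat) : Int))

-- proof-side model of A's n/i/j components (n, power, position)
def pvStepB (a : Int × Int × Nat) (c : Char) : Int × Int × Nat :=
  let n := a.1 + ((c.toNat : Int) - 96) * a.2.1
  let p := a.2.1 * 6
  let n := if c = 'a' ∨ c = 'A' ∨ (c = '0' ∧ a.2.2 = 1) then n + 1 else n
  let n := if c = 'b' ∨ c = 'B' ∨ c = 'd' ∨ (c = 'D' ∧ a.2.2 = 2) then n + 2 else n
  (n, p, a.2.2 + 1)

-- while s > 1 and L[s-1] > L[s-2]: s -= 1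
def pvSuffStart (L : List Int) : Nat → Nat
  | 0 => 0
  | 1 => 1
  | (s + 2) => if L.getD (s + 1) 0 > L.getD s 0 then pvSuffStart L (s + 1) else s + 2

-- while e > 1 and L[e-1] <= L[e-2]: e -= 1
def pvLastHigh (L : List Int) : Nat → Nat
  | 0 => 0
  | 1 => 1
  | (s + 2) => if L.getD (s + 1) 0 ≤ L.getD s 0 then pvLastHigh L (s + 1) else s + 2

theorem pvGetD_append_left (L : List Int) (o : Int) (n : Nat) (h : n < L.length) :
    (L ++ [o]).getD n 0 = L.getD n 0 := by
  simp [List.getD_eq_getElem?_getD, List.getElem?_append_left h]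

theorem pvGetD_append_last (L : List Int) (o : Int) : (L ++ [o]).getD L.length 0 = o := by
  simp [List.getD_eq_getElem?_getD]

theorem pvHeadD_append (l : List Char) (c x : Char) (h : l ≠ []) :
    (l ++ [c]).headD x = l.headD x := by
  cases l with
  | nil => exact absurd rfl h
  | cons a t => simp

theorem pvGetLastD_drop (L : List Int) (k : Nat) (h : k < L.length) :
    (L.drop k).getLastD 0 = L.getD (L.length - 1) 0 := by
  rw [List.getLastD_eq_getLast?, List.getLast?_eq_getElem?, List.getElem?_drop,
    List.getD_eq_getElem?_getD]
  congr 2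
  simp; omega

theorem pvSixPow36 (m : Nat) : ((6:Int)^m * 6 = 36) ↔ m = 1 := by
  constructor
  · intro h
    rw [← pow_succ] at h
    have h2 : ((6^(m+1) : Nat) : Int) = ((6^2 : Nat) : Int) := by push_cast; simpa using h
    have := Nat.pow_right_injective (le_refl 2 |>.trans (by norm_num)) (Nat.cast_injective h2)
    omega
  · intro h; subst h; norm_num

theorem pvSixPow216 (m : Nat) : ((6:Int)^m * 6 = 216) ↔ m = 2 := by
  constructor
  · intro h
    rw [← pow_succ] at h
    have h2 : ((6^(m+1) : Nat) : Int) = ((6^3 : Nat) : Int) := by push_cast; simpa using h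
    have := Nat.pow_right_injective (le_refl 2 |>.trans (by norm_num)) (Nat.cast_injective h2)
    omega
  · intro h; subst h; norm_num

theorem pvSuffStart_append (L : List Int) (o : Int) :
    ∀ s, s ≤ L.length → pvSuffStart (L ++ [o]) s = pvSuffStart L s := by
  intro s
  induction s with
  | zero => intro _; rfl
  | succ s' ih =>
    cases s' with
    | zero => intro _; rfl
    | succ m =>
      intro h
      have h1 : m + 1 < L.length := by omega
      have h2 : m < L.length := by omega
      simp only [pvSuffStart, pvGetD_append_left L o (m+1) h1, pvGetD_append_left L o m h2]
      split_ifs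
      · exact ih (by omega)
      · rfl

theorem pvLastHigh_append (L : List Int) (o : Int) :
    ∀ s, s ≤ L.length → pvLastHigh (L ++ [o]) s = pvLastHigh L s := by
  intro s
  induction s with
  | zero => intro _; rfl
  | succ s' ih =>
    cases s' with
    | zero => intro _; rfl
    | succ m =>
      intro h
      have h1 : m + 1 < L.length := by omega
      have h2 : m < L.length := by omega
      simp only [pvLastHigh, pvGetD_append_left L o (m+1) h1, pvGetD_append_left L o m h2]
      split_ifs
      · exact ih (by omega)
      · rfl

theorem pvSuffStart_bounds (L : List Int) :
    ∀ s, 1 ≤ s → 1 ≤ pvSuffStart L s ∧ pvSuffStart L s ≤ s := by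
  intro s
  induction s with
  | zero => intro h; omega
  | succ s' ih =>
    cases s' with
    | zero => intro _; exact ⟨le_refl 1, le_refl 1⟩
    | succ m =>
      intro _
      simp only [pvSuffStart]
      split_ifs
      · have := ih (by omega); omega
      · omega

theorem pvSuffStart_snoc (L : List Int) (o : Int) (h : 1 ≤ L.length) :
    pvSuffStart (L ++ [o]) (L.length + 1) =
      if o > L.getD (L.length - 1) 0 then pvSuffStart L L.length else L.length + 1 := by
  obtain ⟨m, hm⟩ : ∃ m, L.length = m + 1 := ⟨L.length - 1, by omega⟩
  have e1 : (L ++ [o]).getD (m + 1) 0 = o := by rw [← hm]; exact pvGetD_append_last L o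
  have e2 : (L ++ [o]).getD m 0 = L.getD m 0 := pvGetD_append_left L o m (by omega)
  simp only [hm, Nat.add_sub_cancel]
  show pvSuffStart (L ++ [o]) (m + 2) = _
  simp only [pvSuffStart, e1, e2]
  split_ifs with hc
  · rw [← hm]; exact pvSuffStart_append L o L.length (le_refl _)
  · rfl

theorem pvLastHigh_snoc (L : List Int) (o : Int) (h : 1 ≤ L.length) :
    pvLastHigh (L ++ [o]) (L.length + 1) =
      if o ≤ L.getD (L.length - 1) 0 then pvLastHigh L L.length else L.length + 1 := by
  obtain ⟨m, hm⟩ : ∃ m, L.length = m + 1 := ⟨L.length - 1, by omega⟩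
  have e1 : (L ++ [o]).getD (m + 1) 0 = o := by rw [← hm]; exact pvGetD_append_last L o
  have e2 : (L ++ [o]).getD m 0 = L.getD m 0 := pvGetD_append_left L o m (by omega)
  simp only [hm, Nat.add_sub_cancel]
  show pvLastHigh (L ++ [o]) (m + 2) = _
  simp only [pvLastHigh, e1, e2]
  split_ifs with hc
  · rw [← hm]; exact pvLastHigh_append L o L.length (le_refl _)
  · rfl

theorem pvFoldB_pk (l : List Char) :
    ∀ (n p : Int) (k : Nat),
      (l.foldl pvStepB (n, p, k)).2.1 = p * 6 ^ l.length ∧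
      (l.foldl pvStepB (n, p, k)).2.2 = k + l.length := by
  induction l with
  | nil => intro n p k; simp
  | cons c t ih =>
    intro n p k
    simp only [List.foldl_cons]
    have := ih (pvStepB (n, p, k) c).1 (pvStepB (n, p, k) c).2.1 (pvStepB (n, p, k) c).2.2
    simp only [pvStepB] at this ⊢
    rcases this with ⟨h1, h2⟩
    constructor
    · rw [h1]; rw [List.length_cons]; ring
    · rw [h2]; rw [List.length_cons]; omega

-- the closed form of A's loop state over a nonempty prefix
theorem pvFoldA_closed (l : List Char) (hne : l ≠ []) (d : Int)
    (hd : ((l.headD 'a').toNat : Int) ≤ d) :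
    l.foldl pvStepA (0, 1, 0, [d], 0, 0) =
      ((l.foldl pvStepB (0, 1, 0)).1, (6:Int) ^ l.length, l.length,
       (pvLof l).drop (pvSuffStart (pvLof l) l.length - 1),
       pvSuffStart (pvLof l) l.length,
       if pvLastHigh (pvLof l) l.length > 1 then pvLastHigh (pvLof l) l.length else 0) := by
  induction l using List.reverseRecOn with
  | nil => exact absurd rfl hne
  | append_singleton l' c ih =>
    cases l' with
    | nil =>
      simp only [List.nil_append, List.headD] at hd ⊢
      simp only [List.foldl_cons, List.foldl_nil, pvStepA, pvStepB, pvLof, List.map_cons,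
        List.map_nil, List.length_cons, List.length_nil]
      have hng : ¬ ((c.toNat : Int) > ([d].getLastD 0)) := by simp; exact hd
      rw [if_neg hng]
      norm_num [pvSuffStart, pvLastHigh]
    | cons h' t' =>
      have hl' : (h' :: t') ≠ ([] : List Char) := by simp
      have hdl : (((h' :: t').headD 'a').toNat : Int) ≤ d := by
        rwa [pvHeadD_append (h' :: t') c 'a' hl'] at hd
      rw [List.foldl_append, ih hl' hdl]
      set l' : List Char := h' :: t' with hl'def
      have hlen : 1 ≤ l'.length := by simp [hl'def]
      have hLlen : (pvLof l').length = l'.length := by simp [pvLof]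
      set L' : List Int := pvLof l' with hL'
      set s' : Nat := pvSuffStart L' l'.length with hs'
      have hb := pvSuffStart_bounds L' l'.length hlen
      have hs1 : 1 ≤ s' := hb.1
      have hs2 : s' ≤ l'.length := hb.2
      have hlast : (L'.drop (s' - 1)).getLastD 0 = L'.getD (l'.length - 1) 0 := by
        rw [pvGetLastD_drop L' (s' - 1) (by omega), hLlen]
      have hLofapp : pvLof (l' ++ [c]) = L' ++ [((c.toNat : Nat) : Int)] := by
        simp [pvLof, hL']
      have hlenapp : (l' ++ [c]).length = l'.length + 1 := by simp
      have hss := pvSuffStart_snoc L' ((c.toNat : Nat) : Int) (by omega)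
      have hlh := pvLastHigh_snoc L' ((c.toNat : Nat) : Int) (by omega)
      rw [hLlen] at hss hlh
      obtain ⟨hp, hk⟩ := pvFoldB_pk l' 0 1 0
      have h36 : ∀ (P : Prop), (P ∧ (6:Int) ^ l'.length * 6 = 36) = (P ∧ l'.length = 1) := by
        intro P; rw [pvSixPow36]
      have h216 : ∀ (P : Prop), (P ∧ (6:Int) ^ l'.length * 6 = 216) = (P ∧ l'.length = 2) := by
        intro P; rw [pvSixPow216]
      simp only [List.foldl_append, List.foldl_cons, List.foldl_nil, pvStepA, pvStepB, hp, hk,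
        one_mul, zero_add, hlenapp, hLofapp, hss, hlh, hlast, h36, h216]
      by_cases hgt : ((c.toNat : Nat) : Int) > L'.getD (l'.length - 1) 0
      · rw [if_pos hgt, if_pos hgt, if_neg (by omega : ¬ ((c.toNat : Nat) : Int) ≤ L'.getD (l'.length - 1) 0)]
        rw [List.drop_append_of_le_length (by omega : s' - 1 ≤ L'.length)]
        rw [if_pos (by omega : l'.length + 1 > 1)]
        simp [pow_succ]
        exact hs'
      · rw [if_neg hgt, if_neg hgt, if_pos (by omega : ((c.toNat : Nat) : Int) ≤ L'.getD (l'.length - 1) 0)]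
        have hdrop : (L' ++ [((c.toNat : Nat) : Int)]).drop (l'.length + 1 - 1) = [((c.toNat : Nat) : Int)] := by
          simp only [Nat.add_sub_cancel, ← hLlen]
          simp
        rw [hdrop]
        simp [pow_succ]


-- max over a filtered range: characterisation by the maximal satisfying element
theorem pvMaxFilter_eq (lo hi : Int) (p : Int → Bool) (r : Int)
    (hlo : lo ≤ r) (hhi : r < hi) (hp : p r = true)
    (hmax : ∀ j : Int, r < j → j < hi → p j = false) :
    (PySem.List.max? ((PySem.List.pyRange lo hi 1).filter p) (fun x => x)).getD 0 = r := by
  set xs := (PySem.List.pyRange lo hi 1).filter p with hxs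
  have hrmem : r ∈ xs := by
    rw [hxs]
    exact List.mem_filter.mpr ⟨PySem.List.mem_pyRange_one.mpr ⟨hlo, hhi⟩, hp⟩
  rcases hm : PySem.List.max? xs (fun x => x) with _ | m
  · rw [(PySem.List.max?_eq_none_iff xs _).mp hm] at hrmem
    exact absurd hrmem (List.not_mem_nil)
  · have hmem := PySem.List.max?_mem hm
    have hle : r ≤ m := PySem.List.max?_isMax hm r hrmem
    have hge : m ≤ r := by
      by_contra hgt
      replace hgt : r < m := not_le.mp hgt
      have hmr := List.mem_filter.mp (hxs ▸ hmem)
      have hfalse := hmax m hgt (PySem.List.mem_pyRange_one.mp hmr.1).2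
      rw [hfalse] at hmr
      exact absurd hmr.2 (by simp)
    simp only [Option.getD_some]
    omega

theorem pvMaxFilter_none (lo hi : Int) (p : Int → Bool)
    (h : ∀ j : Int, lo ≤ j → j < hi → p j = false) :
    (PySem.List.max? ((PySem.List.pyRange lo hi 1).filter p) (fun x => x)).getD 0 = 0 := by
  have hnil : (PySem.List.pyRange lo hi 1).filter p = [] := by
    apply List.filter_eq_nil_iff.mpr
    intro a ha
    have := PySem.List.mem_pyRange_one.mp ha
    simp [h a this.1 this.2]
  rw [hnil, (PySem.List.max?_eq_none_iff [] _).mpr rfl]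
  rfl

-- pvSuffStart returns a position satisfying the loop's exit condition …
theorem pvSuffStart_cond (L : List Int) :
    ∀ s, 1 ≤ s →
      (pvSuffStart L s = 1 ∨
        L.getD (pvSuffStart L s - 1) 0 ≤ L.getD (pvSuffStart L s - 2) 0) := by
  intro s
  induction s with
  | zero => intro h; omega
  | succ s' ih =>
    cases s' with
    | zero => intro _; left; rfl
    | succ m =>
      intro _
      simp only [pvSuffStart]
      split_ifs with h
      · exact ih (by omega)
      · right
        exact not_lt.mp h

-- … and every position after it is a strict rise
theorem pvSuffStart_after (L : List Int) :
    ∀ s, ∀ j : Nat, pvSuffStart L s < j → j ≤ s →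
      L.getD (j - 1) 0 > L.getD (j - 2) 0 := by
  intro s
  induction s with
  | zero => intro j h1 h2; omega
  | succ s' ih =>
    cases s' with
    | zero => intro j h1 h2; simp only [pvSuffStart] at h1; omega
    | succ m =>
      intro j h1 h2
      simp only [pvSuffStart] at h1
      split_ifs at h1 with h
      · by_cases hj : j ≤ m + 1
        · exact ih j h1 hj
        · have hje : j = m + 2 := by omega
          subst hje
          simpa using h
      · omega

theorem pvLastHigh_le (L : List Int) : ∀ s, pvLastHigh L s ≤ s := by
  intro s
  induction s with
  | zero => simp [pvLastHigh]
  | succ s' ih =>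
    cases s' with
    | zero => simp [pvLastHigh]
    | succ m =>
      simp only [pvLastHigh]
      split_ifs
      · omega
      · omega

-- pvLastHigh, when > 1, is a strict rise position …
theorem pvLastHigh_cond (L : List Int) :
    ∀ s, 1 < pvLastHigh L s →
      L.getD (pvLastHigh L s - 1) 0 > L.getD (pvLastHigh L s - 2) 0 := by
  intro s
  induction s with
  | zero => intro h; simp only [pvLastHigh] at h; omega
  | succ s' ih =>
    cases s' with
    | zero => intro h; simp only [pvLastHigh] at h; omega
    | succ m =>
      intro h
      simp only [pvLastHigh] at h ⊢
      split_ifs at h ⊢ with hc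
      · exact ih h
      · exact not_le.mp hc

-- … and every later position is a non-rise
theorem pvLastHigh_after (L : List Int) :
    ∀ s, ∀ j : Nat, pvLastHigh L s < j → j ≤ s →
      L.getD (j - 1) 0 ≤ L.getD (j - 2) 0 := by
  intro s
  induction s with
  | zero => intro j h1 h2; omega
  | succ s' ih =>
    cases s' with
    | zero => intro j h1 h2; simp only [pvLastHigh] at h1; omega
    | succ m =>
      intro j h1 h2
      simp only [pvLastHigh] at h1
      split_ifs at h1 with h
      · by_cases hj : j ≤ m + 1
        · exact ih j h1 hj
        · have hje : j = m + 2 := by omega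
          subst hje
          simpa using h
      · omega

-- B's start_ query equals the A-side run start
theorem pvStartv (L : List Int) (hlen : 1 ≤ L.length) :
    (PySem.List.max? ((PySem.List.pyRange 1 ((L.length : Int) + 1) 1).filter
      (fun j => j == 1 || decide (PySem.List.pyGetD L (j - 1) 0 ≤ PySem.List.pyGetD L (j - 2) 0)))
      (fun x => x)).getD 0 = ((pvSuffStart L L.length : Nat) : Int) := by
  have hb := pvSuffStart_bounds L L.length hlen
  set s := pvSuffStart L L.length with hs
  apply pvMaxFilter_eq
  · exact_mod_cast hb.1
  · have : s < L.length + 1 := by omega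
    exact_mod_cast this
  · by_cases h1 : s = 1
    · simp [h1]
    · have h2 : 2 ≤ s := by omega
      rcases pvSuffStart_cond L L.length hlen with hc | hc
      · exact absurd (hs ▸ hc) h1
      · simp only [Bool.or_eq_true, beq_iff_eq, decide_eq_true_eq]
        right
        rw [PySem.List.pyGetD_of_nonneg _ _ (by omega : (0:Int) ≤ (s : Int) - 1),
            PySem.List.pyGetD_of_nonneg _ _ (by omega : (0:Int) ≤ (s : Int) - 2)]
        have e1 : ((s : Int) - 1).toNat = s - 1 := by omega
        have e2 : ((s : Int) - 2).toNat = s - 2 := by omega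
        rw [e1, e2]
        exact hc
  · intro j hj1 hj2
    have hjn1 : s < j.toNat := by omega
    have hjn2 : j.toNat ≤ L.length := by omega
    have hrise := pvSuffStart_after L L.length j.toNat hjn1 hjn2
    have hne1 : ¬ (j = 1) := by omega
    rw [Bool.or_eq_false_iff]
    constructor
    · rw [beq_eq_false_iff_ne]; exact hne1
    · rw [decide_eq_false_iff_not]
      rw [PySem.List.pyGetD_of_nonneg _ _ (by omega : (0:Int) ≤ j - 1),
          PySem.List.pyGetD_of_nonneg _ _ (by omega : (0:Int) ≤ j - 2)]
      have e1 : (j - 1).toNat = j.toNat - 1 := by omega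
      have e2 : (j - 2).toNat = j.toNat - 2 := by omega
      rw [e1, e2]
      omega

-- B's end_ query equals the A-side last-rise position
theorem pvEndv (L : List Int) (hlen : 1 ≤ L.length) :
    (PySem.List.max? ((PySem.List.pyRange 2 ((L.length : Int) + 1) 1).filter
      (fun j => decide (PySem.List.pyGetD L (j - 1) 0 > PySem.List.pyGetD L (j - 2) 0)))
      (fun x => x)).getD 0 =
    (if pvLastHigh L L.length > 1 then ((pvLastHigh L L.length : Nat) : Int) else 0) := by
  set e := pvLastHigh L L.length with he
  have hel : e ≤ L.length := pvLastHigh_le L L.length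
  by_cases hgt : e > 1
  · rw [if_pos hgt]
    apply pvMaxFilter_eq
    · exact_mod_cast hgt
    · have : e < L.length + 1 := by omega
      exact_mod_cast this
    · have hc := pvLastHigh_cond L L.length hgt
      simp only [decide_eq_true_eq]
      rw [PySem.List.pyGetD_of_nonneg _ _ (by omega : (0:Int) ≤ (e : Int) - 1),
          PySem.List.pyGetD_of_nonneg _ _ (by omega : (0:Int) ≤ (e : Int) - 2)]
      have e1 : ((e : Int) - 1).toNat = e - 1 := by omega
      have e2 : ((e : Int) - 2).toNat = e - 2 := by omega
      rw [e1, e2]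
      exact hc
    · intro j hj1 hj2
      have hjn1 : e < j.toNat := by omega
      have hjn2 : j.toNat ≤ L.length := by omega
      have hflat := pvLastHigh_after L L.length j.toNat hjn1 hjn2
      simp only [decide_eq_false_iff_not]
      rw [PySem.List.pyGetD_of_nonneg _ _ (by omega : (0:Int) ≤ j - 1),
          PySem.List.pyGetD_of_nonneg _ _ (by omega : (0:Int) ≤ j - 2)]
      have e1 : (j - 1).toNat = j.toNat - 1 := by omega
      have e2 : (j - 2).toNat = j.toNat - 2 := by omega
      rw [e1, e2]
      omega
  · rw [if_neg hgt]
    apply pvMaxFilter_none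
    intro j hj1 hj2
    have hjn1 : e < j.toNat := by omega
    have hjn2 : j.toNat ≤ L.length := by omega
    have hflat := pvLastHigh_after L L.length j.toNat hjn1 hjn2
    simp only [decide_eq_false_iff_not]
    rw [PySem.List.pyGetD_of_nonneg _ _ (by omega : (0:Int) ≤ j - 1),
        PySem.List.pyGetD_of_nonneg _ _ (by omega : (0:Int) ≤ j - 2)]
    have e1 : (j - 1).toNat = j.toNat - 1 := by omega
    have e2 : (j - 2).toNat = j.toNat - 2 := by omega
    rw [e1, e2]
    omega


theorem pvPyGet?_one {x y : Char} (t : List Char) :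
    PySem.List.pyGet? (x :: y :: t) 1 = some y := by
  simp [PySem.List.pyGet?, PySem.List.pyIdx?]

theorem pvPyGet?_two {x y z : Char} (t : List Char) :
    PySem.List.pyGet? (x :: y :: z :: t) 2 = some z := by
  simp [PySem.List.pyGet?, PySem.List.pyIdx?,
    show (2:Int) ≤ (t.length:Int) + 1 + 1 by omega]

-- position-check increments under snoc
theorem pvPos1_snoc (l : List Char) (c : Char) :
    (if 1 < (l ++ [c]).length ∧ PySem.List.pyGet? (l ++ [c]) 1 = some '0' then (1:Int) else 0) =
    (if 1 < l.length ∧ PySem.List.pyGet? l 1 = some '0' then (1:Int) else 0) +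
    (if c = '0' ∧ l.length = 1 then (1:Int) else 0) := by
  match l with
  | [] => simp [PySem.List.pyGet?, PySem.List.pyIdx?]
  | [x] =>
    simp only [List.cons_append, List.nil_append, List.length_cons, List.length_nil]
    simp [PySem.List.pyGet?, PySem.List.pyIdx?]
  | x :: y :: t =>
    simp only [List.cons_append]
    simp only [pvPyGet?_one (t ++ [c]), pvPyGet?_one t]
    simp

theorem pvPos2_snoc (l : List Char) (c : Char) :
    (if 2 < (l ++ [c]).length ∧ PySem.List.pyGet? (l ++ [c]) 2 = some 'D' then (2:Int) else 0) =
    (if 2 < l.length ∧ PySem.List.pyGet? l 2 = some 'D' then (2:Int) else 0) +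
    (if c = 'D' ∧ l.length = 2 then (2:Int) else 0) := by
  match l with
  | [] => simp [PySem.List.pyGet?, PySem.List.pyIdx?]
  | [x] => simp [PySem.List.pyGet?, PySem.List.pyIdx?]
  | [x, y] =>
    simp only [List.cons_append, List.nil_append, List.length_cons, List.length_nil]
    simp [PySem.List.pyGet?, PySem.List.pyIdx?]
  | x :: y :: z :: t =>
    simp only [List.cons_append]
    simp only [pvPyGet?_two (t ++ [c]), pvPyGet?_two t]
    simp

-- A's n-component equals B's closed-form n
theorem pvHornerShift (M : List Int) :
    ∀ (a b : Int), M.foldr (fun v n => 6 * n + (v - 96)) (a + b) =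
      M.foldr (fun v n => 6 * n + (v - 96)) a + b * 6 ^ M.length := by
  induction M with
  | nil => intro a b; simp
  | cons x t ih =>
    intro a b
    simp only [List.foldr_cons, List.length_cons, ih a b]
    ring

-- A's n-component equals B's closed-form n
theorem pvN_closed (l : List Char) :
    (l.foldl pvStepB (0, 1, 0)).1 =
      (l.map (fun c => ((c.toNat : Nat) : Int))).reverse.foldl (fun n v => 6 * n + (v - 96)) 0
      + (l.countP (fun c => c == 'a' || c == 'A') : Int)
      + 2 * (l.countP (fun c => c == 'b' || c == 'B' || c == 'd') : Int)
      + (if 1 < l.length ∧ PySem.List.pyGet? l 1 = some '0' then (1:Int) else 0)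
      + (if 2 < l.length ∧ PySem.List.pyGet? l 2 = some 'D' then (2:Int) else 0) := by
  induction l using List.reverseRecOn with
  | nil => simp [PySem.List.pyGet?, PySem.List.pyIdx?]
  | append_singleton l c ih =>
    -- LHS: one more pvStepB step from the closed fold state
    obtain ⟨hp, hk⟩ := pvFoldB_pk l 0 1 0
    rw [List.foldl_append]
    simp only [List.foldl_cons, List.foldl_nil, pvStepB, hp, hk, one_mul, zero_add]
    -- Horner-sum increment
    have henum :
        ((l ++ [c]).map (fun c => ((c.toNat : Nat) : Int))).reverse.foldl
          (fun n v => 6 * n + (v - 96)) 0 =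
        (l.map (fun c => ((c.toNat : Nat) : Int))).reverse.foldl
          (fun n v => 6 * n + (v - 96)) 0
        + (((c.toNat : Nat) : Int) - 96) * (6:Int) ^ l.length := by
      rw [List.map_append, List.foldl_reverse, List.foldl_reverse, List.foldr_append]
      have h0 : List.foldr (fun x y => 6 * y + (x - 96)) 0 [((c.toNat : Nat) : Int)]
          = 0 + (((c.toNat : Nat) : Int) - 96) := by norm_num
      simp only [List.map_cons, List.map_nil]
      rw [h0, pvHornerShift]
      simp
    -- countP increments
    have hone1 : (([c].countP (fun c => c == 'a' || c == 'A') : Nat) : Int) =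
        (if c = 'a' ∨ c = 'A' then (1:Int) else 0) := by
      by_cases h : c = 'a' ∨ c = 'A'
      · rcases h with h | h <;> simp [h]
      · have h1 : c ≠ 'a' := fun e => h (Or.inl e)
        have h2 : c ≠ 'A' := fun e => h (Or.inr e)
        simp [h1, h2]
    have hone2 : (([c].countP (fun c => c == 'b' || c == 'B' || c == 'd') : Nat) : Int) =
        (if c = 'b' ∨ c = 'B' ∨ c = 'd' then (1:Int) else 0) := by
      by_cases h : c = 'b' ∨ c = 'B' ∨ c = 'd'
      · rcases h with h | h | h <;> simp [h]
      · have h1 : c ≠ 'b' := fun e => h (Or.inl e)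
        have h2 : c ≠ 'B' := fun e => h (Or.inr (Or.inl e))
        have h3 : c ≠ 'd' := fun e => h (Or.inr (Or.inr e))
        simp [h1, h2, h3]
    have hcnt1 : ((l ++ [c]).countP (fun c => c == 'a' || c == 'A') : Int) =
        (l.countP (fun c => c == 'a' || c == 'A') : Int) +
        (if c = 'a' ∨ c = 'A' then (1:Int) else 0) := by
      rw [List.countP_append]
      push_cast at hone1 ⊢
      omega
    have hcnt2 : ((l ++ [c]).countP (fun c => c == 'b' || c == 'B' || c == 'd') : Int) =
        (l.countP (fun c => c == 'b' || c == 'B' || c == 'd') : Int) +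
        (if c = 'b' ∨ c = 'B' ∨ c = 'd' then (1:Int) else 0) := by
      rw [List.countP_append]
      push_cast at hone2 ⊢
      omega
    -- split A's two conditional bonuses into disjoint parts
    have split1 : ∀ x : Int,
        (if c = 'a' ∨ c = 'A' ∨ (c = '0' ∧ l.length = 1) then x + 1 else x) =
        x + (if c = 'a' ∨ c = 'A' then (1:Int) else 0) +
            (if c = '0' ∧ l.length = 1 then (1:Int) else 0) := by
      intro x
      by_cases ha : c = 'a' ∨ c = 'A' <;> by_cases h0 : c = '0' ∧ l.length = 1
      · exfalso
        rcases h0 with ⟨hc0, _⟩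
        subst hc0
        rcases ha with h | h <;> simp at h
      · rw [if_pos (by tauto), if_pos ha, if_neg h0]; ring
      · rw [if_pos (by tauto), if_neg ha, if_pos h0]; ring
      · rw [if_neg (by tauto), if_neg ha, if_neg h0]; ring
    have split2 : ∀ x : Int,
        (if c = 'b' ∨ c = 'B' ∨ c = 'd' ∨ (c = 'D' ∧ l.length = 2) then x + 2 else x) =
        x + 2 * (if c = 'b' ∨ c = 'B' ∨ c = 'd' then (1:Int) else 0) +
            (if c = 'D' ∧ l.length = 2 then (2:Int) else 0) := by
      intro x
      by_cases hb : c = 'b' ∨ c = 'B' ∨ c = 'd' <;> by_cases hD : c = 'D' ∧ l.length = 2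
      · exfalso
        rcases hD with ⟨hcD, _⟩
        subst hcD
        rcases hb with h | h | h <;> simp at h
      · rw [if_pos (by tauto), if_pos hb, if_neg hD]; ring
      · rw [if_pos (by tauto), if_neg hb, if_pos hD]; ring
      · rw [if_neg (by tauto), if_neg hb, if_neg hD]; ring
    have hpos1' : (if c = '0' ∧ l.length = 1 then (1:Int) else 0) =
        (if 1 < (l ++ [c]).length ∧ PySem.List.pyGet? (l ++ [c]) 1 = some '0' then (1:Int) else 0) -
        (if 1 < l.length ∧ PySem.List.pyGet? l 1 = some '0' then (1:Int) else 0) := by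
      rw [pvPos1_snoc]; ring
    have hpos2' : (if c = 'D' ∧ l.length = 2 then (2:Int) else 0) =
        (if 2 < (l ++ [c]).length ∧ PySem.List.pyGet? (l ++ [c]) 2 = some 'D' then (2:Int) else 0) -
        (if 2 < l.length ∧ PySem.List.pyGet? l 2 = some 'D' then (2:Int) else 0) := by
      rw [pvPos2_snoc]; ring
    rw [split2, split1, ih, henum, hcnt1, hcnt2, hpos1', hpos2']
    ring

-- ===== VERDICT (by name: the statement is the Claim_ definition above) =====
theorem string_to_int_convert_spec : Claim_equal_string_to_int_convert := by
  intro text _ hpre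
  unfold Spec_string_to_int_convert
  unfold Pre_string_to_int_convert at hpre
  rcases hl : text.toList with _ | ⟨c0, rest⟩
  · exact absurd hl hpre
  · have hne : (c0 :: rest) ≠ ([] : List Char) := by simp
    have hclosed := pvFoldA_closed (c0 :: rest) hne ((c0.toNat : Nat) : Int) (by simp)
    have hpv : pvLof (c0 :: rest) = (c0 :: rest).map (fun c => ((c.toNat : Nat) : Int)) := rfl
    have hLlen : ((c0 :: rest).map (fun c => ((c.toNat : Nat) : Int))).length
        = (c0 :: rest).length := by simp
    have hlen1 : 1 ≤ ((c0 :: rest).map (fun c => ((c.toNat : Nat) : Int))).length := by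
      simp
    have hstart := pvStartv ((c0 :: rest).map (fun c => ((c.toNat : Nat) : Int))) hlen1
    have hend := pvEndv ((c0 :: rest).map (fun c => ((c.toNat : Nat) : Int))) hlen1
    rw [hLlen] at hstart hend
    set s : Nat := pvSuffStart ((c0 :: rest).map (fun c => ((c.toNat : Nat) : Int)))
      (c0 :: rest).length with hsdef
    set e : Nat := pvLastHigh ((c0 :: rest).map (fun c => ((c.toNat : Nat) : Int)))
      (c0 :: rest).length with hedef
    have hb := pvSuffStart_bounds ((c0 :: rest).map (fun c => ((c.toNat : Nat) : Int)))
      (c0 :: rest).length (by simp)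
    have hslice : PySem.List.slice ((c0 :: rest).map (fun c => ((c.toNat : Nat) : Int)))
        (some (((s : Nat) : Int) - 1)) none
        = ((c0 :: rest).map (fun c => ((c.toNat : Nat) : Int))).drop (s - 1) := by
      have hcast : ((s : Nat) : Int) - 1 = (((s - 1 : Nat) : Nat) : Int) := by omega
      rw [hcast, PySem.List.slice_from_natCast]
    have hmod : PySem.Int.mod (if e > 1 then ((e : Nat) : Int) else 0) 60 =
        (((if e > 1 then e else 0) % 60 : Nat) : Int) := by
      rw [PySem.Int.mod_eq_emod_of_pos (by norm_num)]
      split_ifs with h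
      · push_cast
        ring
      · simp
    unfold string_to_int_convert string_to_int_convert_alt
    simp only [hl, hclosed, hpv, List.length_map]
    rw [pvN_closed, hstart, hend, hslice, hmod, ← hsdef, ← hedef]
    split_ifs <;> ring
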